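-- pv_equiv track=rewrite | github.com/vishwa091203/chatbot3 | app.py | rank_chunks
-- ===== SOURCE A (Python) =====
-- def tokenize(text: str) -> set[str]:
--     """Simple tokenization for lightweight keyword matching."""
--     cleaned = "".join(ch.lower() if ch.isalnum() else " " for ch in text)
--     return {w for w in cleaned.split() if len(w) > 2}
--
-- def rank_chunks(query: str, chunks: list[str], top_k: int = 4) -> list[str]:
--     """Rank chunks by overlap with query tokens."""
--     query_tokens = tokenize(query)
--     if not query_tokens:
--         return chunks[:top_k]
--
--     scored: list[tuple[int, int, str]] = []
--     for idx, chunk in enumerate(chunks):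
--         chunk_tokens = tokenize(chunk)
--         overlap = len(query_tokens & chunk_tokens)
--         scored.append((overlap, -idx, chunk))
--
--     scored.sort(reverse=True)
--
--     best = [chunk for score, _, chunk in scored if score > 0][:top_k]
--     return best if best else chunks[:top_k]
-- ===== SOURCE B (Python) =====
-- def tokenize(text: str) -> set[str]:
--     """Simple tokenization for lightweight keyword matching."""
--     cleaned = "".join(ch.lower() if ch.isalnum() else " " for ch in text)
--     return {w for w in cleaned.split() if len(w) > 2}
--
-- def rank_chunks(query: str, chunks: list[str], top_k: int = 4) -> list[str]:
--     """Rank chunks by overlap with query tokens (bucket selection, no sort)."""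
--     query_tokens = tokenize(query)
--     if not query_tokens:
--         return chunks[:top_k]
--
--     # Bucket positively-scoring chunks by their overlap; insertion order keeps
--     # equal-score chunks in original (earliest-index-first) order.
--     buckets: dict[int, list[str]] = {}
--     for chunk in chunks:
--         overlap = len(query_tokens & tokenize(chunk))
--         if overlap > 0:
--             buckets.setdefault(overlap, []).append(chunk)
--
--     # Overlap is at most len(query_tokens): walk the scores downwards.
--     best: list[str] = []
--     for score in range(len(query_tokens), 0, -1):
--         best += buckets.get(score, [])
--     best = best[:top_k]
--     return best if best else chunks[:top_k]
-- ===== Notes on version B (the rewrite author's own statement) =====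
-- stated objective: alternative
-- what changed: Replaces the full reverse sort of all (overlap, -idx, chunk) triples by one bucketing pass into a dict keyed by overlap, then concatenates the buckets from the highest possible score (len(query_tokens)) downwards, so no sort is performed; the measured gain is modest because tokenization dominates the runtime.
import Mathlib
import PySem

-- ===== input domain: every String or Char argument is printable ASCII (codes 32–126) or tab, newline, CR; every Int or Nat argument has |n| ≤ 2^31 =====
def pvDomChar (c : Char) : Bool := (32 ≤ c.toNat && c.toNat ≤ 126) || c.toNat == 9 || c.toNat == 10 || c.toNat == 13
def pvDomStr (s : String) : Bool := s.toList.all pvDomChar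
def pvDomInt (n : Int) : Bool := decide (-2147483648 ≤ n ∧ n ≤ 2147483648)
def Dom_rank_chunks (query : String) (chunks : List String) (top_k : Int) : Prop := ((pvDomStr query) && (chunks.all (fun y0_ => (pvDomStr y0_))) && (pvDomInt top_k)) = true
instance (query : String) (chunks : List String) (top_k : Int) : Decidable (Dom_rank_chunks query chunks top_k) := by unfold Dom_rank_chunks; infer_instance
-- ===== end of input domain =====

-- B replaces A's full reverse sort of (overlap, -idx, chunk) triples by bucketing
-- positively-scoring chunks in a dict keyed by overlap and concatenating buckets
-- from the highest possible score downwards (objective: alternative — no sort).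


-- ===== PORT A =====
-- tokenize(text): per-char lowercase/blank, split on whitespace, keep words of len > 2, as a set.
-- (identical helper in both Pythons, shared by both ports)
def pvTokenize (text : String) : PySem.Set String :=
  let cleaned : String :=
    String.ofList (text.toList.map (fun ch =>
      if PySem.Chars.isalnum ch then PySem.Chars.lowerChar ch else ' '))
  PySem.Set.ofList ((PySem.Str.split₀ cleaned).filter (fun w => 2 < PySem.Str.len w))

-- len(query_tokens & tokenize(chunk)) — the scoring expression both Pythons share
def pvOv (query_tokens : PySem.Set String) (chunk : String) : Int :=
  PySem.Set.len (PySem.Set.inter query_tokens (pvTokenize chunk))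

def rank_chunks (query : String) (chunks : List String) (top_k : Int) : List String :=
  let query_tokens := pvTokenize query
  if query_tokens.isEmpty then PySem.List.slice chunks none (some top_k)
  else
    let scored : List (Int × Int × String) :=
      (PySem.List.enumerate chunks).foldl
        (fun acc p => acc ++ [(pvOv query_tokens p.2, -p.1, p.2)]) []
    -- scored.sort(reverse=True): tuple sort on the two integer keys; the third (string)
    -- component is never compared because the -idx components are pairwise distinct.
    let sortd := PySem.List.sorted2 scored (fun t => t.1) (fun t => t.2.1) true
    let best := PySem.List.slice ((sortd.filter (fun t => decide (0 < t.1))).map (fun t => t.2.2)) none (some top_k)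
    if best.isEmpty then PySem.List.slice chunks none (some top_k) else best

-- ===== PORT B =====
def rank_chunks_alt (query : String) (chunks : List String) (top_k : Int) : List String :=
  let query_tokens := pvTokenize query
  if query_tokens.isEmpty then PySem.List.slice chunks none (some top_k)
  else
    let buckets : PySem.Dict Int (List String) :=
      chunks.foldl
        (fun d chunk =>
          let overlap := pvOv query_tokens chunk
          if 0 < overlap then d.modify overlap [] (fun l => l ++ [chunk]) else d)
        PySem.Dict.empty
    let best0 := (PySem.List.pyRange (PySem.Set.len query_tokens) 0 (-1)).foldl
        (fun acc score => acc ++ buckets.getD score []) []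
    let best := PySem.List.slice best0 none (some top_k)
    if best.isEmpty then PySem.List.slice chunks none (some top_k) else best

-- ===== PRECONDITION & SPEC =====
def Spec_rank_chunks (query : String) (chunks : List String) (top_k : Int) (out : List String) : Prop := out = rank_chunks_alt query chunks top_k
instance (query : String) (chunks : List String) (top_k : Int) (out : List String) : Decidable (Spec_rank_chunks query chunks top_k out) := by unfold Spec_rank_chunks; infer_instance

-- ===== CLAIM (what is proved, stated in full; the proofs are below) =====
def Claim_equal_rank_chunks : Prop := ∀ (query : String) (chunks : List String) (top_k : Int), Dom_rank_chunks query chunks top_k → Spec_rank_chunks query chunks top_k (rank_chunks query chunks top_k)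

-- ===== LEMMAS AND PROOFS =====

-- proof-side abbreviations
def pvGet (chunks : List String) (j : Nat) : String := chunks.getD j ""
def pvF (qt : PySem.Set String) (chunks : List String) (j : Nat) : Int × Int × String :=
  (pvOv qt (pvGet chunks j), -(j : Int), pvGet chunks j)
def pvKey (n : Nat) (t : Int × Int × String) : Int := t.1 * ((n : Int) + 1) + t.2.1

lemma pv_ov_bounds (qt : PySem.Set String) (c : String) :
    0 ≤ pvOv qt c ∧ pvOv qt c ≤ (qt.length : Int) := by
  have h : (PySem.Set.inter qt (pvTokenize c)).length ≤ qt.length :=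
    List.length_filter_le _ _
  show 0 ≤ ((PySem.Set.inter qt (pvTokenize c)).length : Int) ∧
    ((PySem.Set.inter qt (pvTokenize c)).length : Int) ≤ (qt.length : Int)
  omega

lemma pv_scored_eq (qt : PySem.Set String) (chunks : List String) :
    (PySem.List.enumerate chunks).foldl
      (fun acc p => acc ++ [(pvOv qt p.2, -p.1, p.2)]) []
    = (List.range chunks.length).map (pvF qt chunks) := by
  rw [PySem.List.foldl_append_singleton_eq_map, List.nil_append,
      PySem.List.enumerate_eq_map_pyRange chunks "", PySem.List.pyRange_one]
  unfold PySem.List.len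
  simp [List.map_map, Function.comp_def, PySem.List.pyGetD_natCast, pvF, pvGet]

lemma pv_chunks_eq (chunks : List String) :
    (List.range chunks.length).map (pvGet chunks) = chunks := by
  have h := PySem.List.map_pyGetD_pyRange_zero chunks ""
  rw [PySem.List.pyRange_one] at h
  unfold PySem.List.len at h
  simpa [List.map_map, Function.comp_def, PySem.List.pyGetD_natCast, pvGet] using h

lemma pv_mem_scored {qt : PySem.Set String} {chunks : List String}
    {x : Int × Int × String}
    (hx : x ∈ (List.range chunks.length).map (pvF qt chunks)) :
    ∃ j, j < chunks.length ∧ x = pvF qt chunks j := by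
  rcases List.mem_map.mp hx with ⟨j, hj, rfl⟩
  exact ⟨j, List.mem_range.mp hj, rfl⟩

lemma pv_scored_bounds {qt : PySem.Set String} {chunks : List String}
    {x : Int × Int × String}
    (hx : x ∈ (List.range chunks.length).map (pvF qt chunks)) :
    -(chunks.length : Int) < x.2.1 ∧ x.2.1 ≤ 0 ∧ 0 ≤ x.1 ∧ x.1 ≤ (qt.length : Int) := by
  rcases pv_mem_scored hx with ⟨j, hj, rfl⟩
  have hb := pv_ov_bounds qt (pvGet chunks j)
  simp only [pvF]
  refine ⟨by omega, by omega, hb.1, hb.2⟩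

lemma pv_key_mono (n : Nat) (a b : Int × Int × String)
    (ha : -(n : Int) < a.2.1 ∧ a.2.1 ≤ 0) (hb : -(n : Int) < b.2.1 ∧ b.2.1 ≤ 0)
    (h : b.1 < a.1) : pvKey n b < pvKey n a := by
  have h2 : (b.1 + 1) * ((n : Int) + 1) ≤ a.1 * ((n : Int) + 1) :=
    mul_le_mul_of_nonneg_right (by omega) (by positivity)
  unfold pvKey
  nlinarith [ha.1, ha.2, hb.1, hb.2]

lemma pv_key_eq_case (n : Nat) (a b : Int × Int × String) (he : a.1 = b.1) :
    pvKey n b < pvKey n a ↔ b.2.1 < a.2.1 := by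
  simp only [pvKey, he]
  omega

lemma pv_key_lt (n : Nat) (a b : Int × Int × String)
    (ha : -(n : Int) < a.2.1 ∧ a.2.1 ≤ 0) (hb : -(n : Int) < b.2.1 ∧ b.2.1 ≤ 0) :
    pvKey n b < pvKey n a ↔ (b.1 < a.1 ∨ (¬ a.1 < b.1 ∧ b.2.1 < a.2.1)) := by
  constructor
  · intro h
    by_cases h1 : b.1 < a.1
    · exact Or.inl h1
    · by_cases h2 : a.1 < b.1
      · have hk := pv_key_mono n b a hb ha h2
        exact absurd h (by omega)
      · have he : a.1 = b.1 := by omega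
        exact Or.inr ⟨h2, (pv_key_eq_case n a b he).mp h⟩
  · rintro (h | ⟨h1, h2⟩)
    · exact pv_key_mono n a b ha hb h
    · by_cases hlt : b.1 < a.1
      · exact pv_key_mono n a b ha hb hlt
      · have he : a.1 = b.1 := by omega
        exact (pv_key_eq_case n a b he).mpr h2

lemma pv_insertBy_congr {α : Type} (f g : α → α → Bool) (S : List α)
    (h : ∀ a ∈ S, ∀ b ∈ S, f a b = g a b) (x : α) (hx : x ∈ S) :
    ∀ acc, (∀ y ∈ acc, y ∈ S) →
      PySem.List.insertBy f x acc = PySem.List.insertBy g x acc := by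
  intro acc
  induction acc with
  | nil => intro _; rfl
  | cons y ys ih =>
    intro hacc
    simp only [PySem.List.insertBy]
    rw [h x hx y (hacc y (by simp))]
    split
    · rfl
    · rw [ih (fun z hz => hacc z (List.mem_cons_of_mem _ hz))]

lemma pv_foldl_insertBy_congr {α : Type} (f g : α → α → Bool) (S : List α)
    (h : ∀ a ∈ S, ∀ b ∈ S, f a b = g a b) :
    ∀ (xs acc : List α), (∀ x ∈ xs, x ∈ S) → (∀ y ∈ acc, y ∈ S) →
      xs.foldl (fun acc x => PySem.List.insertBy f x acc) acc
        = xs.foldl (fun acc x => PySem.List.insertBy g x acc) acc := by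
  intro xs
  induction xs with
  | nil => intro acc _ _; rfl
  | cons x xs ih =>
    intro acc hxs hacc
    simp only [List.foldl_cons]
    rw [pv_insertBy_congr f g S h x (hxs x (by simp)) acc hacc]
    exact ih _ (fun z hz => hxs z (List.mem_cons_of_mem _ hz))
      (fun z hz => ((PySem.List.mem_insertBy g x z acc).mp hz).elim
        (fun he => he ▸ hxs x (by simp)) (fun hm => hacc z hm))

lemma pv_flatMap_congr {α β : Type} (f g : α → List β) (l : List α)
    (h : ∀ a ∈ l, f a = g a) : l.flatMap f = l.flatMap g := by
  induction l with
  | nil => rfl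
  | cons a l ih =>
    simp only [List.flatMap_cons]
    rw [h a (by simp), ih (fun b hb => h b (List.mem_cons_of_mem _ hb))]

lemma pv_perm_flatMap_filter (S : List Int) :
    ∀ (l : List (Int × Int × String)), S.Nodup → (∀ x ∈ l, x.1 ∈ S) →
      (S.flatMap (fun s => l.filter (fun x => x.1 == s))).Perm l := by
  induction S with
  | nil =>
    intro l _ hcov
    cases l with
    | nil => simp
    | cons a t => exact absurd (hcov a (by simp)) (by simp)
  | cons s S' ih =>
    intro l hnd hcov
    have hsS : s ∉ S' := (List.nodup_cons.mp hnd).1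
    have hS' : S'.Nodup := (List.nodup_cons.mp hnd).2
    simp only [List.flatMap_cons]
    have hflat : S'.flatMap (fun t => l.filter (fun x => x.1 == t))
        = S'.flatMap (fun t => (l.filter (fun x => !(x.1 == s))).filter
            (fun x => x.1 == t)) := by
      apply pv_flatMap_congr
      intro t ht
      rw [List.filter_filter]
      apply List.filter_congr
      intro x _
      by_cases hx : x.1 = t
      · have hts : t ≠ s := fun he => hsS (he ▸ ht)
        simp [hx, hts]
      · simp [hx]
    rw [hflat]
    have cov' : ∀ x ∈ l.filter (fun x => !(x.1 == s)), x.1 ∈ S' := by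
      intro x hx
      have hm := List.mem_of_mem_filter hx
      have hne : ¬ (x.1 == s) = true := by
        have := List.of_mem_filter hx
        simpa using this
      have := hcov x hm
      simp only [List.mem_cons] at this
      rcases this with h | h
      · exact absurd (by simp [h]) hne
      · exact h
    refine List.Perm.trans ?_ (List.filter_append_perm (fun x => x.1 == s) l)
    exact List.Perm.append_left _ (ih _ hS' cov')

lemma pv_sorted2_eq_sorted (qt : PySem.Set String) (chunks : List String) :
    PySem.List.sorted2 ((List.range chunks.length).map (pvF qt chunks))
        (fun t => t.1) (fun t => t.2.1) true
      = PySem.List.sorted ((List.range chunks.length).map (pvF qt chunks))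
          (pvKey chunks.length) true := by
  show List.foldl _ [] _ = List.foldl _ [] _
  apply pv_foldl_insertBy_congr _ _ ((List.range chunks.length).map (pvF qt chunks))
  · intro a ha b hb
    have hba := pv_scored_bounds ha
    have hbb := pv_scored_bounds hb
    have hiff := pv_key_lt chunks.length a b ⟨hba.1, hba.2.1⟩ ⟨hbb.1, hbb.2.1⟩
    show (decide (b.1 < a.1) || (!decide (a.1 < b.1) && decide (b.2.1 < a.2.1)))
        = decide (pvKey chunks.length b < pvKey chunks.length a)
    have hd : (decide (b.1 < a.1) || (!decide (a.1 < b.1) && decide (b.2.1 < a.2.1)))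
        = decide (b.1 < a.1 ∨ (¬ a.1 < b.1 ∧ b.2.1 < a.2.1)) := by
      by_cases h1 : b.1 < a.1 <;> by_cases h2 : a.1 < b.1 <;>
        by_cases h3 : b.2.1 < a.2.1 <;> simp [h1, h2, h3]
    rw [hd]
    exact decide_eq_decide.mpr hiff.symm
  · intro x hx; exact hx
  · intro y hy; simp at hy

lemma pv_scored_pairwise (qt : PySem.Set String) (chunks : List String) :
    ((List.range chunks.length).map (pvF qt chunks)).Pairwise
      (fun a b => b.2.1 < a.2.1) := by
  rw [List.pairwise_map]
  apply List.Pairwise.imp _ (List.pairwise_lt_range (n := chunks.length))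
  intro i j hij
  simp only [pvF]
  omega

lemma pv_pairwise_groups (qt : PySem.Set String) (chunks : List String) :
    ∀ (S : List Int), S.Pairwise (fun a b => b < a) →
      (S.flatMap (fun s => ((List.range chunks.length).map (pvF qt chunks)).filter
          (fun t => t.1 == s))).Pairwise
        (fun a b => pvKey chunks.length b < pvKey chunks.length a) := by
  intro S
  induction S with
  | nil => intro _; simp
  | cons s S' ih =>
    intro hS
    simp only [List.flatMap_cons]
    rw [List.pairwise_append]
    refine ⟨?_, ih hS.of_cons, ?_⟩
    · -- within one score group: equal first keys, strictly decreasing -idx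
      have hsub : (((List.range chunks.length).map (pvF qt chunks)).filter
          (fun t => t.1 == s)).Pairwise (fun a b => b.2.1 < a.2.1) :=
        List.Pairwise.sublist List.filter_sublist (pv_scored_pairwise qt chunks)
      apply List.Pairwise.imp_of_mem ?_ hsub
      intro a b ha hb hlt
      have ha1 : a.1 = s := by simpa using List.of_mem_filter ha
      have hb1 : b.1 = s := by simpa using List.of_mem_filter hb
      have hba := pv_scored_bounds (List.mem_of_mem_filter ha)
      have hbb := pv_scored_bounds (List.mem_of_mem_filter hb)
      exact (pv_key_lt chunks.length a b ⟨hba.1, hba.2.1⟩ ⟨hbb.1, hbb.2.1⟩).mpr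
        (Or.inr ⟨by omega, hlt⟩)
    · -- across groups: strictly smaller score
      intro a ha b hb
      rcases List.mem_flatMap.mp hb with ⟨s', hs', hb'⟩
      have hlt : s' < s := List.rel_of_pairwise_cons hS hs'
      have ha1 : a.1 = s := by simpa using List.of_mem_filter ha
      have hb1 : b.1 = s' := by simpa using List.of_mem_filter hb'
      have hba := pv_scored_bounds (List.mem_of_mem_filter ha)
      have hbb := pv_scored_bounds (List.mem_of_mem_filter hb')
      exact pv_key_mono chunks.length a b ⟨hba.1, hba.2.1⟩ ⟨hbb.1, hbb.2.1⟩ (by omega)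

lemma pv_range_desc_pairwise (M : Int) (b : Int) :
    (PySem.List.pyRange M b (-1)).Pairwise (fun a c => c < a) := by
  rw [PySem.List.pyRange_neg_one]
  rw [List.pairwise_map]
  apply List.Pairwise.imp _ (List.pairwise_lt_range (n := (M - b).toNat))
  intro i j hij
  show M - (j : Int) < M - (i : Int)
  omega

lemma pv_sorted_eq (qt : PySem.Set String) (chunks : List String) :
    PySem.List.sorted ((List.range chunks.length).map (pvF qt chunks))
        (pvKey chunks.length) true
      = (PySem.List.pyRange ((qt.length : Int)) (-1) (-1)).flatMap
          (fun s => ((List.range chunks.length).map (pvF qt chunks)).filter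
            (fun t => t.1 == s)) := by
  apply PySem.List.sorted_rev_eq_of_perm_of_pairwise_gt
  · apply pv_perm_flatMap_filter
    · rw [PySem.List.pyRange_neg_one]
      apply List.Nodup.map _ List.nodup_range
      intro i j hij
      have h2 : ((qt.length : Int)) - (i : Int) = ((qt.length : Int)) - (j : Int) := hij
      omega
    · intro x hx
      have hb := pv_scored_bounds hx
      rw [PySem.List.pyRange_neg_one]
      simp only [List.mem_map, List.mem_range]
      exact ⟨((qt.length : Int) - x.1).toNat, by omega, by omega⟩
  · exact pv_pairwise_groups qt chunks _ (pv_range_desc_pairwise _ _)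

lemma pv_range_split (M : Int) (hM : 0 ≤ M) :
    PySem.List.pyRange M (-1) (-1) = PySem.List.pyRange M 0 (-1) ++ [(0 : Int)] := by
  rw [PySem.List.pyRange_neg_one, PySem.List.pyRange_neg_one]
  have h1 : (M - -1).toNat = (M - 0).toNat + 1 := by omega
  rw [h1, List.range_succ, List.map_append]
  simp only [List.map_cons, List.map_nil]
  congr 1
  simp only [List.cons.injEq, and_true]
  omega

lemma pv_mem_range_desc {M s : Int} (hs : s ∈ PySem.List.pyRange M 0 (-1)) :
    1 ≤ s ∧ s ≤ M := by
  rw [PySem.List.pyRange_neg_one] at hs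
  simp only [List.mem_map, List.mem_range] at hs
  rcases hs with ⟨k, hk, rfl⟩
  omega

lemma pv_bucket_getD (qt : PySem.Set String) (chunks : List String) (s : Int) :
    (chunks.foldl
        (fun d chunk =>
          let overlap := pvOv qt chunk
          if 0 < overlap then d.modify overlap [] (fun l => l ++ [chunk]) else d)
        PySem.Dict.empty).getD s []
      = (chunks.filter (fun c => decide (0 < pvOv qt c))).filter
          (fun c => pvOv qt c == s) := by
  show (chunks.foldl
      (fun d chunk =>
        if 0 < pvOv qt chunk then d.modify (pvOv qt chunk) [] (fun l => l ++ [chunk]) else d)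
      PySem.Dict.empty).getD s [] = _
  rw [PySem.List.foldl_ite_eq_foldl_filter (p := fun c => 0 < pvOv qt c)]
  have hfold : ∀ (l : List String) (d : PySem.Dict Int (List String)),
      l.foldl (fun d chunk => d.modify (pvOv qt chunk) [] fun ls => ls ++ [chunk]) d
        = (l.map (fun c => (pvOv qt c, c))).foldl
            (fun d p => d.modify p.1 [] fun ls => ls ++ [p.2]) d := by
    intro l
    induction l with
    | nil => intro d; rfl
    | cons c l ih =>
      intro d
      simp only [List.foldl_cons, List.map_cons]
      exact ih _
  rw [hfold, PySem.Dict.getD_foldl_modify_append]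
  rw [List.filter_map]
  simp [List.map_map, Function.comp_def]

lemma pv_best_eq (qt : PySem.Set String) (chunks : List String) :
    ((PySem.List.sorted2 ((List.range chunks.length).map (pvF qt chunks))
        (fun t => t.1) (fun t => t.2.1) true).filter
          (fun t => decide (0 < t.1))).map (fun t => t.2.2)
    = (PySem.List.pyRange (PySem.Set.len qt) 0 (-1)).flatMap
        (fun s => (chunks.foldl
          (fun d chunk =>
            let overlap := pvOv qt chunk
            if 0 < overlap then d.modify overlap [] (fun l => l ++ [chunk]) else d)
          PySem.Dict.empty).getD s []) := by
  have hlen : PySem.Set.len qt = (qt.length : Int) := rfl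
  rw [pv_sorted2_eq_sorted, pv_sorted_eq, hlen]
  rw [pv_range_split (qt.length : Int) (by positivity)]
  rw [List.filter_flatMap, List.map_flatMap, List.flatMap_append]
  have hzero : ((((List.range chunks.length).map (pvF qt chunks)).filter
      (fun t => t.1 == (0 : Int))).filter (fun t => decide (0 < t.1))).map
        (fun t => t.2.2) = [] := by
    rw [List.filter_filter]
    rw [List.filter_eq_nil_iff.mpr]
    · rfl
    · intro t _
      simp only [Bool.and_eq_true, decide_eq_true_eq, beq_iff_eq, not_and]
      intro h1 h2
      omega
  rw [show (List.flatMap (fun s => (List.map (fun t => t.2.2)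
        ((List.filter (fun t => decide (0 < t.1))
          (List.filter (fun t => t.1 == s)
            ((List.range chunks.length).map (pvF qt chunks))))))) [(0:Int)]) = [] by
    simpa using hzero]
  rw [List.append_nil]
  apply pv_flatMap_congr
  intro s hs
  have hs1 := pv_mem_range_desc hs
  rw [pv_bucket_getD]
  -- left side: drop the positivity filter (s ≥ 1), then push through the map
  rw [List.filter_filter]
  have hL : (((List.range chunks.length).map (pvF qt chunks)).filter
      (fun t => decide (0 < t.1) && (t.1 == s))) =
      (((List.range chunks.length).map (pvF qt chunks)).filter (fun t => t.1 == s)) := by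
    apply List.filter_congr
    intro t _
    by_cases h : t.1 = s
    · simp [h]; omega
    · simp [h]
  rw [hL]
  -- right side: merge the two chunk filters and drop positivity
  rw [List.filter_filter]
  have hR : (chunks.filter (fun c => (pvOv qt c == s) && decide (0 < pvOv qt c))) =
      (chunks.filter (fun c => pvOv qt c == s)) := by
    apply List.filter_congr
    intro c _
    by_cases h : pvOv qt c = s
    · simp [h]; omega
    · simp [h]
  rw [hR]
  -- both sides are the same filtered selection of chunks
  conv_rhs => rw [← pv_chunks_eq chunks]
  rw [List.filter_map, List.filter_map, List.map_map]
  rfl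

-- ===== VERDICT (by name: the statement is the Claim_ definition above) =====
theorem rank_chunks_spec : Claim_equal_rank_chunks := by
  intro query chunks top_k _hdom
  unfold Spec_rank_chunks rank_chunks rank_chunks_alt
  by_cases hq : (pvTokenize query).isEmpty
  · simp only [hq, if_true]
  · simp only [hq]
    rw [pv_scored_eq (pvTokenize query) chunks, pv_best_eq (pvTokenize query) chunks,
        PySem.List.foldl_append_eq_flatMap, List.nil_append]
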